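-- pv_equiv track=rewrite | github.com/monaya37/DSP-Tasks | functions.py | sub_signals
-- ===== SOURCE A (Python) =====
-- def sub_signals(signal_a, signal_b):
--     combined = {}
--
--     # Add values from the first signal
--     for index, value in signal_a[2].items():
--         combined[index] = value
--
--     # Subtract values from the second signal
--     for index, value in signal_b[2].items():
--         if index in combined:
--             combined[index] -= value  # Subtract the values for overlapping keys
--         else:
--             combined[index] = -value  # Add new key-value pairs
--
--     combined = dict(sorted(combined.items()))
--     indices = list(combined.keys())
--     values = list(combined.values())
--     return indices, values, combined
-- ===== SOURCE B (Python) =====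
-- def sub_signals(signal_a, signal_b):
--     items_a = sorted(signal_a[2].items())
--     items_b = sorted(signal_b[2].items())
--     merged = []
--     i = j = 0
--     while i < len(items_a) and j < len(items_b):
--         ka, va = items_a[i]
--         kb, vb = items_b[j]
--         if ka < kb:
--             merged.append((ka, va))
--             i += 1
--         elif kb < ka:
--             merged.append((kb, -vb))
--             j += 1
--         else:
--             merged.append((ka, va - vb))
--             i += 1
--             j += 1
--     merged.extend(items_a[i:])
--     merged.extend((k, -v) for k, v in items_b[j:])
--     indices = [k for k, _ in merged]
--     values = [v for _, v in merged]
--     return indices, values, dict(merged)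
-- ===== Notes on version B (the rewrite author's own statement) =====
-- stated objective: alternative
-- what changed: B sorts each signal's items separately and produces the result by a two-pointer merge of the two sorted lists (subtracting on equal keys, negating b-only keys), with no dict-membership tests and no sort of the merged result.
import Mathlib
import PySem

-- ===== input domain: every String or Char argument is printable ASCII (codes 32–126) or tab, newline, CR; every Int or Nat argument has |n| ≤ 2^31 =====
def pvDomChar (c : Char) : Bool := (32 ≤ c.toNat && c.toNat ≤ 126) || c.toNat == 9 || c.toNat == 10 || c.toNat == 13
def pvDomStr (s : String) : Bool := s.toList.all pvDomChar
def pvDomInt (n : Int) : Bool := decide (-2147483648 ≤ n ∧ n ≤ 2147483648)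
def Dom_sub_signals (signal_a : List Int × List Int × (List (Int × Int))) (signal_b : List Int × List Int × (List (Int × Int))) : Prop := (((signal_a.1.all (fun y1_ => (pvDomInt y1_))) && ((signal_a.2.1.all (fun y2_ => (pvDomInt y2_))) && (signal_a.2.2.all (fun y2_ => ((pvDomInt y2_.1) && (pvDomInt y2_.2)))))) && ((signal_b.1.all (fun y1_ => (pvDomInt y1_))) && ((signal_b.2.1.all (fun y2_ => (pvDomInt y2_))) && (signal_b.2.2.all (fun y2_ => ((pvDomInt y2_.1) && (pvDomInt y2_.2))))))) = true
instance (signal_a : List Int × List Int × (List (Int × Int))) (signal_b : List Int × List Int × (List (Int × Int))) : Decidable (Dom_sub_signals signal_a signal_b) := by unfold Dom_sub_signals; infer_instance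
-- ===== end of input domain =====

-- B replaces A's merge-into-a-dict-then-sort with a two-pointer merge of the two separately
-- sorted item lists (objective: alternative; similar cost, no dict-membership tests).

-- ===== PORT A =====
-- the third component of each signal denotes a Python dict; PySem.Dict.ofList is that dict
def sub_signals (signal_a : List Int × List Int × (List (Int × Int))) (signal_b : List Int × List Int × (List (Int × Int))) : List Int × List Int × (List (Int × Int)) :=
  let da := PySem.Dict.ofList signal_a.2.2
  let db := PySem.Dict.ofList signal_b.2.2
  -- for index, value in signal_a[2].items(): combined[index] = value
  let combined := da.items.foldl (fun c p => c.insert p.1 p.2) PySem.Dict.empty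
  -- for index, value in signal_b[2].items(): if in combined subtract, else insert the negation
  let combined := db.items.foldl (fun c p =>
      if c.contains p.1 then c.insert p.1 (c.getD p.1 0 - p.2)
      else c.insert p.1 (-p.2)) combined
  -- combined = dict(sorted(combined.items())): keys are unique, so Python's tuple sort is the sort by key
  let items := PySem.List.sorted combined.items (fun p => p.1) false
  (items.map (fun p => p.1), items.map (fun p => p.2), items)

-- ===== PORT B =====
-- B's while-loop with two cursors and the two trailing extends, as one recursive merge:
-- the [],lb case is 'merged.extend((k,-v) for k,v in items_b[j:])', the la,[] case 'merged.extend(items_a[i:])'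
def mergeSub : List (Int × Int) → List (Int × Int) → List (Int × Int)
  | [], lb => lb.map (fun p => (p.1, -p.2))
  | la, [] => la
  | (ka, va) :: ta, (kb, vb) :: tb =>
    if ka < kb then (ka, va) :: mergeSub ta ((kb, vb) :: tb)
    else if kb < ka then (kb, -vb) :: mergeSub ((ka, va) :: ta) tb
    else (ka, va - vb) :: mergeSub ta tb
termination_by la lb => la.length + lb.length

def sub_signals_alt (signal_a : List Int × List Int × (List (Int × Int))) (signal_b : List Int × List Int × (List (Int × Int))) : List Int × List Int × (List (Int × Int)) :=
  -- items_a = sorted(signal_a[2].items()); dict keys are unique, so the tuple sort is the sort by key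
  let items_a := PySem.List.sorted (PySem.Dict.ofList signal_a.2.2).items (fun p => p.1) false
  let items_b := PySem.List.sorted (PySem.Dict.ofList signal_b.2.2).items (fun p => p.1) false
  let merged := mergeSub items_a items_b
  (merged.map (fun p => p.1), merged.map (fun p => p.2), (PySem.Dict.ofList merged).items)

-- ===== PRECONDITION & SPEC =====
def Spec_sub_signals (signal_a : List Int × List Int × (List (Int × Int))) (signal_b : List Int × List Int × (List (Int × Int))) (out : List Int × List Int × (List (Int × Int))) : Prop := out = sub_signals_alt signal_a signal_b
instance (signal_a : List Int × List Int × (List (Int × Int))) (signal_b : List Int × List Int × (List (Int × Int))) (out : List Int × List Int × (List (Int × Int))) : Decidable (Spec_sub_signals signal_a signal_b out) := by unfold Spec_sub_signals; infer_instance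

-- ===== CLAIM (what is proved, stated in full; the proofs are below) =====
def Claim_equal_sub_signals : Prop := ∀ (signal_a : List Int × List Int × (List (Int × Int))) (signal_b : List Int × List Int × (List (Int × Int))), Dom_sub_signals signal_a signal_b → Spec_sub_signals signal_a signal_b (sub_signals signal_a signal_b)

-- ===== LEMMAS AND PROOFS =====

-- ---- A-side lemmas ----

-- the merged fold function of A's second loop, with the branch pushed into the inserted value
lemma fold_sub_branch_push (c : PySem.Dict Int Int) (p : Int × Int) :
    (if c.contains p.1 then c.insert p.1 (c.getD p.1 0 - p.2) else c.insert p.1 (-p.2)) =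
    c.insert p.1 (if c.contains p.1 then c.getD p.1 0 - p.2 else -p.2) := by
  by_cases h : c.contains p.1 <;> simp [h]

-- A's second loop leaves keys not occurring in l untouched
lemma fold_sub_untouched (l : List (Int × Int)) (d : PySem.Dict Int Int) (k : Int)
    (hk : k ∉ l.map (fun p => p.1)) :
    ((l.foldl (fun c p => c.insert p.1 (if c.contains p.1 then c.getD p.1 0 - p.2 else -p.2)) d).getD k 0
       = d.getD k 0) ∧
    ((l.foldl (fun c p => c.insert p.1 (if c.contains p.1 then c.getD p.1 0 - p.2 else -p.2)) d).contains k
       = d.contains k) := by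
  induction l generalizing d with
  | nil => simp
  | cons a t ih =>
    simp only [List.map_cons, List.mem_cons, not_or] at hk
    obtain ⟨h1, h2⟩ := hk
    simp only [List.foldl_cons]
    refine ⟨?_, ?_⟩
    · rw [(ih _ h2).1, PySem.Dict.getD_insert]; simp [h1]
    · rw [(ih _ h2).2, PySem.Dict.contains_insert]; simp [h1]

-- A's second loop on a key that occurs once in l
lemma fold_sub_hit (l : List (Int × Int)) (d : PySem.Dict Int Int) (k v : Int)
    (hnd : (l.map (fun p => p.1)).Nodup) (hm : (k, v) ∈ l) :
    (l.foldl (fun c p => c.insert p.1 (if c.contains p.1 then c.getD p.1 0 - p.2 else -p.2)) d).getD k 0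
      = if d.contains k then d.getD k 0 - v else -v := by
  induction l generalizing d with
  | nil => cases hm
  | cons a t ih =>
    simp only [List.map_cons, List.nodup_cons] at hnd
    obtain ⟨ha, hndt⟩ := hnd
    simp only [List.foldl_cons]
    rcases List.mem_cons.mp hm with heq | hmt
    · -- a = (k, v): afterwards k is untouched
      subst heq
      rw [(fold_sub_untouched t _ k (by simpa using ha)).1, PySem.Dict.getD_insert]
      simp
    · -- (k, v) ∈ t, so k ≠ a.1
      have hk1 : k ≠ a.1 := by
        intro h; exact ha (by simpa [← h] using List.mem_map_of_mem (f := fun p => p.1) hmt)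
      rw [ih _ hndt hmt, PySem.Dict.getD_insert, PySem.Dict.contains_insert]
      simp [hk1]

-- ---- B-side lemmas ----

-- the key skeleton of B's merge, for the proofs only
def mergeK : List Int → List Int → List Int
  | [], b => b
  | a, [] => a
  | x :: xs, y :: ys =>
    if x < y then x :: mergeK xs (y :: ys)
    else if y < x then y :: mergeK (x :: xs) ys
    else x :: mergeK xs ys
termination_by a b => a.length + b.length

lemma mem_mergeK : ∀ (a b : List Int) (k : Int), k ∈ mergeK a b ↔ k ∈ a ∨ k ∈ b := by
  intro a
  induction a with
  | nil => intro b k; simp [mergeK]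
  | cons x xs ihx =>
    intro b
    induction b with
    | nil => intro k; simp [mergeK]
    | cons y ys ihy =>
      intro k
      by_cases h1 : x < y
      · simp only [mergeK, if_pos h1, List.mem_cons, ihx (y :: ys) k]; tauto
      · by_cases h2 : y < x
        · simp only [mergeK, if_neg h1, if_pos h2, List.mem_cons] at ihy ⊢
          rw [ihy k]; tauto
        · have hxy : x = y := le_antisymm (not_lt.mp h2) (not_lt.mp h1)
          subst hxy
          simp only [mergeK, if_neg h1, List.mem_cons, ihx ys k]; tauto

lemma pairwise_lt_mergeK : ∀ (a b : List Int), a.Pairwise (· < ·) → b.Pairwise (· < ·) →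
    (mergeK a b).Pairwise (· < ·) := by
  intro a
  induction a with
  | nil => intro b _ hb; simpa [mergeK] using hb
  | cons x xs ihx =>
    intro b
    induction b with
    | nil => intro ha _; simpa [mergeK] using ha
    | cons y ys ihy =>
      intro ha hb
      obtain ⟨hxall, hxs⟩ := List.pairwise_cons.mp ha
      obtain ⟨hyall, hys⟩ := List.pairwise_cons.mp hb
      by_cases h1 : x < y
      · rw [show mergeK (x :: xs) (y :: ys) = x :: mergeK xs (y :: ys) from by simp [mergeK, h1]]
        refine List.pairwise_cons.mpr ⟨?_, ihx (y :: ys) hxs hb⟩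
        intro k hk
        rcases (mem_mergeK xs (y :: ys) k).mp hk with h | h
        · exact hxall k h
        · rcases List.mem_cons.mp h with rfl | h
          · exact h1
          · exact h1.trans (hyall k h)
      · by_cases h2 : y < x
        · rw [show mergeK (x :: xs) (y :: ys) = y :: mergeK (x :: xs) ys from by simp [mergeK, h1, h2]]
          refine List.pairwise_cons.mpr ⟨?_, ihy ha hys⟩
          intro k hk
          rcases (mem_mergeK (x :: xs) ys k).mp hk with h | h
          · rcases List.mem_cons.mp h with rfl | h
            · exact h2
            · exact h2.trans (hxall k h)
          · exact hyall k h
        · have hxy : x = y := le_antisymm (not_lt.mp h2) (not_lt.mp h1)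
          subst hxy
          rw [show mergeK (x :: xs) (x :: ys) = x :: mergeK xs ys from by simp [mergeK]]
          refine List.pairwise_cons.mpr ⟨?_, ihx ys hxs hys⟩
          intro k hk
          rcases (mem_mergeK xs ys k).mp hk with h | h
          · exact hxall k h
          · exact hyall k h

-- B's merge on two strictly key-increasing item lists, characterised over the merged keys
lemma mergeSub_map (gA gB : Int → Int) : ∀ (ka kb : List Int), ka.Pairwise (· < ·) → kb.Pairwise (· < ·) →
    mergeSub (ka.map (fun k => (k, gA k))) (kb.map (fun k => (k, gB k)))
      = (mergeK ka kb).map (fun k => (k, if k ∈ ka then (if k ∈ kb then gA k - gB k else gA k) else -(gB k))) := by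
  intro ka
  induction ka with
  | nil =>
    intro kb _ _
    simp [mergeSub, mergeK, List.map_map, Function.comp]
  | cons x xs ihx =>
    intro kb
    induction kb with
    | nil =>
      intro hka _
      rw [show mergeK (x :: xs) [] = x :: xs from by simp [mergeK]]
      rw [show mergeSub ((x :: xs).map (fun k => (k, gA k))) ([].map (fun k => (k, gB k)))
            = (x :: xs).map (fun k => (k, gA k)) from by simp [mergeSub]]
      exact List.map_congr_left (fun k hk => by simp [hk])
    | cons y ys ihy =>
      intro hka hkb
      obtain ⟨hxall, hxs⟩ := List.pairwise_cons.mp hka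
      obtain ⟨hyall, hys⟩ := List.pairwise_cons.mp hkb
      by_cases h1 : x < y
      · have hxnb : x ∉ y :: ys := by
          intro h
          rcases List.mem_cons.mp h with rfl | h
          · exact absurd h1 (lt_irrefl x)
          · exact absurd (h1.trans (hyall x h)) (lt_irrefl x)
        rw [show mergeK (x :: xs) (y :: ys) = x :: mergeK xs (y :: ys) from by simp [mergeK, h1]]
        rw [show mergeSub ((x :: xs).map (fun k => (k, gA k))) ((y :: ys).map (fun k => (k, gB k)))
              = (x, gA x) :: mergeSub (xs.map (fun k => (k, gA k))) ((y :: ys).map (fun k => (k, gB k)))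
            from by simp [mergeSub, h1]]
        rw [ihx (y :: ys) hxs hkb, List.map_cons]
        refine congrArg₂ _ (by simp [hxnb]) (List.map_congr_left ?_)
        intro k hk
        have hkx : x < k := by
          rcases (mem_mergeK xs (y :: ys) k).mp hk with h | h
          · exact hxall k h
          · rcases List.mem_cons.mp h with rfl | h
            · exact h1
            · exact h1.trans (hyall k h)
        simp [List.mem_cons, hkx.ne']
      · by_cases h2 : y < x
        · have hynb : y ∉ x :: xs := by
            intro h
            rcases List.mem_cons.mp h with h | h
            · omega
            · exact absurd (h2.trans (hxall y h)) (lt_irrefl y)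
          rw [show mergeK (x :: xs) (y :: ys) = y :: mergeK (x :: xs) ys from by simp [mergeK, h1, h2]]
          rw [show mergeSub ((x :: xs).map (fun k => (k, gA k))) ((y :: ys).map (fun k => (k, gB k)))
                = (y, -(gB y)) :: mergeSub ((x :: xs).map (fun k => (k, gA k))) (ys.map (fun k => (k, gB k)))
              from by simp [mergeSub, h1, h2]]
          rw [ihy hka hys, List.map_cons]
          refine congrArg₂ _ (by simp [hynb]) (List.map_congr_left ?_)
          intro k hk
          have hky : y < k := by
            rcases (mem_mergeK (x :: xs) ys k).mp hk with h | h
            · rcases List.mem_cons.mp h with rfl | h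
              · exact h2
              · exact h2.trans (hxall k h)
            · exact hyall k h
          simp [List.mem_cons, hky.ne']
        · have hxy : x = y := le_antisymm (not_lt.mp h2) (not_lt.mp h1)
          subst hxy
          rw [show mergeK (x :: xs) (x :: ys) = x :: mergeK xs ys from by simp [mergeK]]
          rw [show mergeSub ((x :: xs).map (fun k => (k, gA k))) ((x :: ys).map (fun k => (k, gB k)))
                = (x, gA x - gB x) :: mergeSub (xs.map (fun k => (k, gA k))) (ys.map (fun k => (k, gB k)))
              from by simp [mergeSub]]
          rw [ihx ys hxs hys, List.map_cons]
          refine congrArg₂ _ (by simp) (List.map_congr_left ?_)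
          intro k hk
          have hkx : x < k := by
            rcases (mem_mergeK xs ys k).mp hk with h | h
            · exact hxall k h
            · exact hyall k h
          simp [List.mem_cons, hkx.ne']

-- sorted(d.items()) is the sorted key list with each key paired with its value
lemma sorted_items_eq (d : PySem.Dict Int Int) (hnd : d.keys.Nodup) :
    PySem.List.sorted d.items (fun p => p.1) false
      = (PySem.List.sorted (PySem.Set.ofList d.keys) (fun k => k) false).map (fun k => (k, d.getD k 0)) := by
  apply PySem.List.sorted_eq_of_perm_of_pairwise_lt
  · have hp : (PySem.List.sorted (PySem.Set.ofList d.keys) (fun k => k) false).Perm d.keys := by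
      calc (PySem.List.sorted (PySem.Set.ofList d.keys) (fun k => k) false).Perm
            (PySem.Set.ofList d.keys) := PySem.List.sorted_perm _ _ _
        _ = d.keys := PySem.Set.ofList_eq_self_of_nodup _ hnd
    rw [PySem.Dict.items_eq_map_keys d hnd 0]
    exact hp.map _
  · exact List.pairwise_map.mpr (PySem.List.sorted_ofList_pairwise_lt _)

theorem sub_signals_eq (signal_a signal_b : List Int × List Int × (List (Int × Int))) :
    sub_signals signal_a signal_b = sub_signals_alt signal_a signal_b := by
  unfold sub_signals sub_signals_alt
  dsimp only
  set da := PySem.Dict.ofList signal_a.2.2 with hda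
  set db := PySem.Dict.ofList signal_b.2.2 with hdb
  have hnda : da.keys.Nodup := PySem.Dict.nodup_keys_ofList _
  have hndb : db.keys.Nodup := PySem.Dict.nodup_keys_ofList _
  -- the per-key value both programs compute
  set f : Int → Int := fun i =>
    if da.contains i then (if db.contains i then da.getD i 0 - db.getD i 0 else da.getD i 0)
    else -(db.getD i 0) with hf
  -- A's first loop rebuilds da
  have hd1 : da.items.foldl (fun c p => c.insert p.1 p.2) PySem.Dict.empty = da := by
    apply PySem.Dict.ext
    rw [show (fun (c : PySem.Dict Int Int) (p : Int × Int) => c.insert p.1 p.2)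
          = (fun c p => c.insert ((fun q : Int × Int => q.1) p) ((fun q : Int × Int => q.2) p)) from rfl,
        PySem.Dict.items_foldl_insert_fresh _ _ _ _ (fun a _ => PySem.Dict.contains_empty _)
          (by simpa [PySem.Dict.keys] using hnda)]
    simp [PySem.Dict.empty]
  rw [hd1]
  -- push the branch of A's second loop into the inserted value
  rw [show (fun (c : PySem.Dict Int Int) (p : Int × Int) =>
        if c.contains p.1 then c.insert p.1 (c.getD p.1 0 - p.2) else c.insert p.1 (-p.2))
      = (fun c p => c.insert p.1 (if c.contains p.1 then c.getD p.1 0 - p.2 else -p.2)) from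
      funext fun c => funext fun p => fold_sub_branch_push c p]
  set d2 := db.items.foldl
      (fun c p => c.insert p.1 (if c.contains p.1 then c.getD p.1 0 - p.2 else -p.2)) da with hd2
  set keys := PySem.List.sorted (PySem.Set.ofList (da.keys ++ db.keys)) (fun k => k) false with hkeys
  have hmapfst : db.items.map (fun p => p.1) = db.keys := rfl
  have hd2keys : d2.keys = PySem.Set.ofList (da.keys ++ db.keys) := by
    rw [hd2, PySem.Dict.keys_foldl_insert_key db.items (fun p => p.1)
          (fun c p => if c.contains p.1 then c.getD p.1 0 - p.2 else -p.2) da, hmapfst,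
        PySem.Set.ofList_append, PySem.Set.ofList_eq_self_of_nodup _ hnda]
  have hd2nodup : d2.keys.Nodup := by rw [hd2keys]; exact PySem.Set.nodup_ofList _
  have hPW : keys.Pairwise (fun a b => a < b) := PySem.List.sorted_ofList_pairwise_lt _
  have hperm : keys.Perm (PySem.Set.ofList (da.keys ++ db.keys)) := PySem.List.sorted_perm _ _ _
  have hkeysnodup : keys.Nodup := hperm.nodup_iff.mpr (PySem.Set.nodup_ofList _)
  -- A's merged dict looks up to f on every merged key
  have hval : ∀ k ∈ keys, d2.getD k 0 = f k := by
    intro k hk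
    have hk' : k ∈ da.keys ∨ k ∈ db.keys := by
      have := hperm.mem_iff.mp hk
      rw [PySem.Set.mem_ofList] at this
      simpa using this
    by_cases hb : k ∈ db.keys
    · obtain ⟨p, hpm, hp1⟩ := List.mem_map.mp (hmapfst ▸ hb)
      have hm : (k, p.2) ∈ db.items := by rw [← hp1]; simpa using hpm
      rw [hd2, fold_sub_hit db.items da k p.2 (hmapfst ▸ hndb) hm, hf]
      have hcb : db.contains k = true := (PySem.Dict.contains_iff_mem_keys db k).mpr hb
      have hgb : db.getD k 0 = p.2 := PySem.Dict.getD_of_mem_items db hm hndb 0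
      by_cases hca : da.contains k = true <;> simp [hca, hcb, hgb]
    · have hka : k ∈ da.keys := hk'.resolve_right hb
      rw [hd2, (fold_sub_untouched db.items da k (by rwa [hmapfst])).1, hf]
      have hcb : db.contains k = false := by
        rw [← Bool.not_eq_true]; exact fun h => hb ((PySem.Dict.contains_iff_mem_keys db k).mp h)
      have hca : da.contains k = true := (PySem.Dict.contains_iff_mem_keys da k).mpr hka
      simp [hca, hcb]
  -- A's result items
  have hitems : PySem.List.sorted d2.items (fun p => p.1) false = keys.map (fun k => (k, f k)) := by
    apply PySem.List.sorted_eq_of_perm_of_pairwise_lt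
    · have h1 : keys.map (fun k => (k, f k)) = keys.map (fun k => (k, d2.getD k 0)) :=
        List.map_congr_left (fun k hk => by rw [hval k hk])
      rw [h1, PySem.Dict.items_eq_map_keys d2 hd2nodup 0]
      exact (hd2keys ▸ hperm).map _
    · exact List.pairwise_map.mpr hPW
  rw [hitems]
  -- B's merge produces the same list
  set sA := PySem.List.sorted (PySem.Set.ofList da.keys) (fun k => k) false with hsA
  set sB := PySem.List.sorted (PySem.Set.ofList db.keys) (fun k => k) false with hsB
  have hpwA : sA.Pairwise (· < ·) := PySem.List.sorted_ofList_pairwise_lt _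
  have hpwB : sB.Pairwise (· < ·) := PySem.List.sorted_ofList_pairwise_lt _
  have hmemA : ∀ k, k ∈ sA ↔ k ∈ da.keys := by
    intro k
    rw [hsA, PySem.List.mem_sorted, PySem.Set.mem_ofList]
  have hmemB : ∀ k, k ∈ sB ↔ k ∈ db.keys := by
    intro k
    rw [hsB, PySem.List.mem_sorted, PySem.Set.mem_ofList]
  -- the merged key skeleton is exactly A's sorted key union
  have hK : keys = mergeK sA sB := by
    rw [hkeys]
    apply PySem.List.sorted_eq_of_perm_of_pairwise_lt
    · refine (List.perm_ext_iff_of_nodup ?_ (PySem.Set.nodup_ofList _)).mpr ?_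
      · exact (pairwise_lt_mergeK sA sB hpwA hpwB).imp (fun h => ne_of_lt h)
      · intro k
        rw [mem_mergeK, hmemA, hmemB, PySem.Set.mem_ofList, List.mem_append]
    · exact pairwise_lt_mergeK sA sB hpwA hpwB
  have hmerge : mergeSub (PySem.List.sorted da.items (fun p => p.1) false)
      (PySem.List.sorted db.items (fun p => p.1) false) = keys.map (fun k => (k, f k)) := by
    rw [sorted_items_eq da hnda, sorted_items_eq db hndb, ← hsA, ← hsB,
        mergeSub_map (fun k => da.getD k 0) (fun k => db.getD k 0) sA sB hpwA hpwB, ← hK]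
    refine List.map_congr_left ?_
    intro k _
    rw [hf]
    by_cases hA : k ∈ da.keys <;> by_cases hB : k ∈ db.keys <;>
      simp [hmemA k, hmemB k, hA, hB, PySem.Dict.contains_iff_mem_keys]
  rw [hmerge]
  -- dict(merged) has merged itself as its items: the merged keys are distinct
  have hofl : (PySem.Dict.ofList (keys.map (fun k => (k, f k)))).items = keys.map (fun k => (k, f k)) := by
    rw [show PySem.Dict.ofList (keys.map (fun k => (k, f k)))
          = (keys.map (fun k => (k, f k))).foldl (fun d p => d.insert p.1 p.2) PySem.Dict.empty from rfl]
    rw [show (fun (d : PySem.Dict Int Int) (p : Int × Int) => d.insert p.1 p.2)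
          = (fun d p => d.insert ((fun q : Int × Int => q.1) p) ((fun q : Int × Int => q.2) p)) from rfl]
    rw [PySem.Dict.items_foldl_insert_fresh _ _ _ _ (fun a _ => PySem.Dict.contains_empty _)
          (by simpa [Function.comp_def] using hkeysnodup)]
    simp [PySem.Dict.empty]
  rw [hofl]

-- ===== VERDICT (by name: the statement is the Claim_ definition above) =====
theorem sub_signals_spec : Claim_equal_sub_signals := by
  intro signal_a signal_b _
  exact sub_signals_eq signal_a signal_b
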